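-- pv_equiv track=rewrite | github.com/mthrok/luchador | luchador/nn/core/backend/theano/layer/transform.py | _compute_concat_shape
-- ===== SOURCE A (Python) =====
-- def _compute_concat_shape(shapes, axis):
--     _shape = [None] * len(shapes[0])
--     _shape[axis] = 0
--     for shape in shapes:
--         for i, val in enumerate(shape):
--             if i == axis:
--                 if _shape[i] is None or val is None:
--                     _shape[i] = None
--                 else:
--                     _shape[i] += val
--             else:
--                 if _shape[i] is None or val is None:
--                     _shape[i] = _shape[i] or val
--                 else:
--                     if not _shape[i] == val:
--                         raise ValueError('Inconsistent shape')
--     return _shape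
-- ===== SOURCE B (Python) =====
-- def _compute_concat_shape(shapes, axis):
--     axis_total = 0
--     for shape in shapes:
--         val = shape[axis]
--         axis_total = None if (axis_total is None or val is None) else axis_total + val
--     result = []
--     for i, column in enumerate(zip(*shapes)):
--         if i == axis:
--             result.append(axis_total)
--         else:
--             cur = None
--             for val in column:
--                 if cur is None or val is None:
--                     cur = cur or val
--                 elif cur != val:
--                     raise ValueError('Inconsistent shape')
--             result.append(cur)
--     return result
-- ===== Notes on version B (the rewrite author's own statement) =====
-- stated objective: alternative
-- what changed: B computes the result column-wise in two passes (a dedicated fold for the axis sum, then a cur-fold over each transposed non-axis column of zip(*shapes)) instead of A's row-major loop that mutates a preallocated _shape list in place.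
-- outside the precondition, e.g. on _compute_concat_shape([[2, 3], [2]], 0): A returns [4, 3], B returns [4]; on _compute_concat_shape([[None]], -1): A returns [None], B returns [None]
import Mathlib
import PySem

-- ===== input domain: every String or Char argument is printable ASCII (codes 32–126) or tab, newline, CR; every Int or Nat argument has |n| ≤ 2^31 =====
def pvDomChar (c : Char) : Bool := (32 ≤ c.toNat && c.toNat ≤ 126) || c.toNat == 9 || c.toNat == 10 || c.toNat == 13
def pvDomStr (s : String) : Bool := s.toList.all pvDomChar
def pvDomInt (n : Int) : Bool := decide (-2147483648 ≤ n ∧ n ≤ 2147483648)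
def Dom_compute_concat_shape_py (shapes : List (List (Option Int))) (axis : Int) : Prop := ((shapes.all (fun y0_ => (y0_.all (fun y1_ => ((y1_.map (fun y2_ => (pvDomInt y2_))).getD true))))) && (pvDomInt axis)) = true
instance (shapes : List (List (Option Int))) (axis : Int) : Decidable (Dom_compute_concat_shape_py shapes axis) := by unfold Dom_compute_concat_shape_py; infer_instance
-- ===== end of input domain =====

-- B recomputes the result column-wise (a separate pass for the axis sum, then a fold
-- over each transposed column) instead of A's row-major in-place updates of a
-- preallocated list; objective: alternative decomposition, same asymptotic cost.
-- Both programs raise ValueError on inconsistent non-axis columns; those inputs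
-- (and other raising inputs) are outside Pre_.

-- ===== PORT A =====
-- one step of A's inner loop: iv = (i, val) from enumerate(shape); the Python raises
-- IndexError when i >= len(_shape) (row longer than shapes[0]) and ValueError on an
-- inconsistent non-axis value — both excluded by Pre_; the port leaves the state
-- unchanged at exactly those points.
def pvStepA (axis : Int) (st : List (Option Int)) (iv : Int × Option Int) : List (Option Int) :=
  if iv.1 = axis then
    if st.getD iv.1.toNat none = none ∨ iv.2 = none then
      st.set iv.1.toNat none
    else
      st.set iv.1.toNat (some ((st.getD iv.1.toNat none).getD 0 + iv.2.getD 0))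
  else
    if st.getD iv.1.toNat none = none ∨ iv.2 = none then
      -- `_shape[i] = _shape[i] or val` (Python truthiness: 0 and None are falsy)
      st.set iv.1.toNat
        (if st.getD iv.1.toNat none = none ∨ st.getD iv.1.toNat none = some 0
         then iv.2 else st.getD iv.1.toNat none)
    else
      if ¬ st.getD iv.1.toNat none = iv.2 then st  -- raise ValueError (excluded by Pre_)
      else st

def compute_concat_shape_py (shapes : List (List (Option Int))) (axis : Int) : List (Option Int) :=
  let rank := (shapes.headD []).length  -- len(shapes[0]); shapes = [] raises IndexError (excluded by Pre_)
  -- `_shape[axis] = 0` with Python's negative-index wrap; out-of-range raises (excluded by Pre_)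
  let j := if axis < 0 then axis + rank else axis
  let init := if 0 ≤ j ∧ j < (rank : Int)
              then (List.replicate rank (none : Option Int)).set j.toNat (some 0)
              else List.replicate rank (none : Option Int)
  shapes.foldl (fun st shape => (PySem.List.enumerate shape).foldl (pvStepA axis) st) init

-- ===== PORT B =====
-- axis pass: axis_total folded across shapes[..][axis]; shape[axis] out of range
-- raises IndexError in Python (excluded by Pre_), modeled as absorbing none.
def pvAxisStep (axis : Int) (acc : Option Int) (shape : List (Option Int)) : Option Int :=
  match PySem.List.pyGet? shape axis with
  | none => none
  | some val => if acc = none ∨ val = none then none else some (acc.getD 0 + val.getD 0)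

-- column fold: the exact rule of B's inner loop; the raise branch (excluded by Pre_)
-- keeps cur.
def pvColStep (cur val : Option Int) : Option Int :=
  if cur = none ∨ val = none then
    (if cur = none ∨ cur = some 0 then val else cur)  -- `cur or val`
  else
    if ¬ cur = val then cur  -- raise ValueError (excluded by Pre_)
    else cur

-- zip(*shapes): columns, truncated to the shortest row
def pvZipStar (rows : List (List (Option Int))) : List (List (Option Int)) :=
  if rows = [] ∨ rows.any (·.isEmpty) then []
  else (rows.map (·.headD none)) :: pvZipStar (rows.map (·.tail))
termination_by (rows.headD []).length
decreasing_by
  rename_i h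
  rw [not_or] at h
  obtain ⟨h1, h2⟩ := h
  simp only [List.any_eq_true, not_exists, not_and] at h2
  cases rows with
  | nil => exact absurd rfl h1
  | cons r rs =>
    have hr : ¬ r.isEmpty = true := h2 r (by simp)
    cases r with
    | nil => simp at hr
    | cons a as => simp [List.headD]

def compute_concat_shape_py_alt (shapes : List (List (Option Int))) (axis : Int) : List (Option Int) :=
  let axisTotal := shapes.foldl (pvAxisStep axis) (some 0)
  (PySem.List.enumerate (pvZipStar shapes)).foldl
    (fun res ic => res ++ [if ic.1 = axis then axisTotal else ic.2.foldl pvColStep none]) []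

-- ===== PRECONDITION & SPEC =====
-- the j-th column of shapes (rows all have length > j under Pre_)
def pvCol (shapes : List (List (Option Int))) (j : Nat) : List (Option Int) :=
  shapes.map (fun s => s.getD j none)

-- exactly the columns on which A's (and B's) `cur`-fold raises ValueError:
-- two distinct concrete values where the earlier one either is nonzero or is
-- followed by no None before the later one (a 0 followed by a None resets `cur`
-- via Python's falsy `or`)
def pvRaiseCol (col : List (Option Int)) : Bool :=
  (List.range col.length).any (fun j =>
    (List.range col.length).any (fun k =>
      decide (j < k) && decide (col.getD j none ≠ none) && decide (col.getD k none ≠ none) &&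
      decide (col.getD j none ≠ col.getD k none) &&
      (decide (col.getD j none ≠ some 0) ||
        (List.range k).all (fun m => !(decide (j < m)) || decide (col.getD m none ≠ none)))))

-- Pre_ excludes exactly: empty shapes (IndexError), negative or out-of-range axis
-- (negative axis wraps in `_shape[axis] = 0` but never matches enumerate's i, an
-- accidental artefact that usually ends in ValueError), ragged rows (longer rows
-- raise IndexError; shorter rows are a malformed input for a concat shape, outside
-- the natural domain), and inconsistent non-axis columns (ValueError in A and B).
def Pre_compute_concat_shape_py (shapes : List (List (Option Int))) (axis : Int) : Prop :=
  shapes ≠ [] ∧ 0 ≤ axis ∧ axis < ((shapes.headD []).length : Int) ∧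
  (∀ s ∈ shapes, s.length = (shapes.headD []).length) ∧
  (∀ j, j < (shapes.headD []).length → (j : Int) ≠ axis → pvRaiseCol (pvCol shapes j) = false)

instance (shapes : List (List (Option Int))) (axis : Int) : Decidable (Pre_compute_concat_shape_py shapes axis) := by
  unfold Pre_compute_concat_shape_py; infer_instance

def pvWitness_compute_concat_shape_py : List (List (Option Int)) × Int :=
  ([[some 2, none], [some 2, some 5]], 1)

def Spec_compute_concat_shape_py (shapes : List (List (Option Int))) (axis : Int) (out : List (Option Int)) : Prop := out = compute_concat_shape_py_alt shapes axis
instance (shapes : List (List (Option Int))) (axis : Int) (out : List (Option Int)) : Decidable (Spec_compute_concat_shape_py shapes axis out) := by unfold Spec_compute_concat_shape_py; infer_instance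

-- ===== CLAIM (what is proved, stated in full; the proofs are below) =====
def Claim_equal_compute_concat_shape_py : Prop := ∀ (shapes : List (List (Option Int))) (axis : Int), Dom_compute_concat_shape_py shapes axis → Pre_compute_concat_shape_py shapes axis → Spec_compute_concat_shape_py shapes axis (compute_concat_shape_py shapes axis)

-- ===== LEMMAS AND PROOFS =====

-- the abstract per-index update both programs perform (proof helper)
def pvG (axis : Int) (n : Nat) (cur val : Option Int) : Option Int :=
  if (n : Int) = axis then
    (if cur = none ∨ val = none then none else some (cur.getD 0 + val.getD 0))
  else pvColStep cur val

theorem pvStepA_length (axis : Int) (st : List (Option Int)) (iv : Int × Option Int) :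
    (pvStepA axis st iv).length = st.length := by
  unfold pvStepA; split_ifs <;> simp

theorem pvStepA_getD (axis : Int) (st : List (Option Int)) (s : Nat) (v : Option Int)
    (hs : s < st.length) (n : Nat) :
    (pvStepA axis st ((s : Int), v)).getD n none
      = if n = s then pvG axis s (st.getD s none) v else st.getD n none := by
  have htn : ((s : Int)).toNat = s := Int.toNat_natCast s
  unfold pvStepA pvG pvColStep
  simp only [htn]
  by_cases hn : n = s
  · subst hn
    split_ifs <;> simp_all [List.getD_eq_getElem?_getD]
  · split_ifs <;> simp_all [List.getD_eq_getElem?_getD, List.getElem?_set_ne, Ne.symm hn]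

theorem pvRow_getD (axis : Int) (shape : List (Option Int)) (st : List (Option Int)) (s : Nat)
    (hlen : s + shape.length ≤ st.length) (n : Nat) :
    ((PySem.List.enumerate shape (s : Int)).foldl (pvStepA axis) st).getD n none
      = if s ≤ n ∧ n < s + shape.length
        then pvG axis n (st.getD n none) (shape.getD (n - s) none)
        else st.getD n none := by
  induction shape generalizing st s with
  | nil => simp [PySem.List.enumerate_nil]
  | cons v tl ih =>
    rw [PySem.List.enumerate_cons, List.foldl_cons]
    have hs : s < st.length := by simp at hlen ⊢; omega
    have hlen' : (s + 1) + tl.length ≤ (pvStepA axis st ((s : Int), v)).length := by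
      rw [pvStepA_length]; simp at hlen; omega
    have hcast : (s : Int) + 1 = ((s + 1 : Nat) : Int) := by push_cast; ring
    rw [hcast, ih (pvStepA axis st ((s : Int), v)) (s + 1) hlen']
    rw [pvStepA_getD axis st s v hs n]
    by_cases hn : n = s
    · subst hn
      simp
    · simp only [if_neg hn]
      by_cases hc : s + 1 ≤ n ∧ n < s + 1 + tl.length
      · rw [if_pos hc, if_pos (by simp; omega)]
        have : n - s = (n - (s + 1)) + 1 := by omega
        rw [this, List.getD_cons_succ]
      · rw [if_neg hc, if_neg (by simp at hc ⊢; omega)]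

theorem pvRow_length (axis : Int) (l : List (Int × Option Int)) (st : List (Option Int)) :
    (l.foldl (pvStepA axis) st).length = st.length := by
  induction l generalizing st with
  | nil => rfl
  | cons x xs ih => simp [List.foldl_cons, ih, pvStepA_length]

theorem pvA_fold_getD (axis : Int) (shapes : List (List (Option Int)))
    (st : List (Option Int))
    (hlen : ∀ r ∈ shapes, r.length = st.length) (n : Nat) (hn : n < st.length) :
    (shapes.foldl (fun st shape => (PySem.List.enumerate shape).foldl (pvStepA axis) st) st).getD n none
      = shapes.foldl (fun c sh => pvG axis n c (sh.getD n none)) (st.getD n none) := by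
  induction shapes generalizing st with
  | nil => rfl
  | cons r rs ih =>
    simp only [List.foldl_cons]
    have hr : r.length = st.length := hlen r (by simp)
    have h0 : ((PySem.List.enumerate r).foldl (pvStepA axis) st).length = st.length := by
      rw [pvRow_length]
    rw [ih _ (by intro x hx; rw [h0]; exact hlen x (by simp [hx])) (by omega)]
    have h1 := pvRow_getD axis r st 0 (by omega) n
    simp only [Nat.cast_zero, Nat.zero_add, Nat.zero_le, true_and, Nat.sub_zero] at h1
    rw [h1, if_pos (by omega)]

theorem pvZipStar_eq (n : Nat) (rows : List (List (Option Int)))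
    (hne : rows ≠ []) (hlen : ∀ r ∈ rows, r.length = n) :
    pvZipStar rows = (List.range n).map (fun j => rows.map (fun r => r.getD j none)) := by
  induction n generalizing rows with
  | zero =>
    rw [pvZipStar]
    rw [if_pos]
    · simp
    · right
      cases rows with
      | nil => exact absurd rfl hne
      | cons r rs =>
        simp only [List.any_cons, Bool.or_eq_true]
        left
        have := hlen r (by simp)
        simpa [List.isEmpty_iff] using List.eq_nil_of_length_eq_zero this
  | succ m ih =>
    rw [pvZipStar, if_neg]
    · have htne : rows.map (·.tail) ≠ [] := by
        cases rows with
        | nil => exact absurd rfl hne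
        | cons r rs => simp
      have htlen : ∀ r ∈ rows.map (List.tail ·), r.length = m := by
        intro t ht
        obtain ⟨r, hr, rfl⟩ := List.mem_map.mp ht
        have := hlen r hr
        simp [List.length_tail, this]
      rw [ih _ htne htlen]
      rw [List.range_succ_eq_map]
      simp only [List.map_cons, List.map_map]
      refine congrArg₂ List.cons ?_ ?_
      · apply List.map_congr_left
        intro r _
        cases r <;> simp
      · apply List.map_congr_left
        intro j _
        simp only [Function.comp]
        apply List.map_congr_left
        intro r _
        cases r <;> simp
    · rw [not_or]
      refine ⟨hne, ?_⟩
      simp only [List.any_eq_true, not_exists, not_and]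
      intro r hr
      have := hlen r hr
      simp [List.isEmpty_iff]
      intro h; rw [h] at this; simp at this

theorem pvOuter_length (axis : Int) (shapes : List (List (Option Int))) (st : List (Option Int)) :
    (shapes.foldl (fun st shape => (PySem.List.enumerate shape).foldl (pvStepA axis) st) st).length = st.length := by
  induction shapes generalizing st with
  | nil => rfl
  | cons r rs ih => simp [List.foldl_cons, ih, pvRow_length]

theorem pvMain (shapes : List (List (Option Int))) (axis : Int)
    (hne : shapes ≠ []) (hax0 : 0 ≤ axis)
    (haxlt : axis < ((shapes.headD []).length : Int))
    (hlens : ∀ s ∈ shapes, s.length = (shapes.headD []).length) :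
    compute_concat_shape_py shapes axis = compute_concat_shape_py_alt shapes axis := by
  set rank := (shapes.headD []).length with hrank
  set a := axis.toNat with hadef
  have ha : axis = (a : Int) := (Int.toNat_of_nonneg hax0).symm
  have halt : a < rank := by omega
  -- A side
  have hAdef : compute_concat_shape_py shapes axis
      = shapes.foldl (fun st shape => (PySem.List.enumerate shape).foldl (pvStepA axis) st)
          ((List.replicate rank (none : Option Int)).set a (some 0)) := by
    unfold compute_concat_shape_py
    dsimp only
    rw [if_neg (show ¬ axis < 0 by omega), if_pos (show 0 ≤ axis ∧ axis < (rank : Int) from ⟨hax0, by omega⟩)]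
  have hAlen : (compute_concat_shape_py shapes axis).length = rank := by
    rw [hAdef, pvOuter_length]; simp
  -- B side
  have hcols : pvZipStar shapes = (List.range rank).map (fun j => shapes.map (fun r => r.getD j none)) :=
    pvZipStar_eq rank shapes hne hlens
  have hBdef : compute_concat_shape_py_alt shapes axis
      = (PySem.List.enumerate (pvZipStar shapes)).map
          (fun ic => if ic.1 = axis then shapes.foldl (pvAxisStep axis) (some 0)
                     else ic.2.foldl pvColStep none) := by
    unfold compute_concat_shape_py_alt
    dsimp only
    rw [PySem.List.foldl_append_singleton_eq_map, List.nil_append]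
  have hBlen : (compute_concat_shape_py_alt shapes axis).length = rank := by
    rw [hBdef]; simp [PySem.List.length_enumerate, hcols]
  apply List.ext_getElem (by rw [hAlen, hBlen])
  intro n hn1 hn2
  have hn : n < rank := by omega
  -- A value at n
  have hinit : ((List.replicate rank (none : Option Int)).set a (some 0)).getD n none
      = if n = a then some 0 else none := by
    by_cases h : n = a
    · subst h; simp [List.getD_eq_getElem?_getD, hn]
    · rw [List.getD_eq_getElem?_getD, List.getElem?_set]
      simp [show ¬ a = n from fun e => h e.symm, h]
  have hA : (compute_concat_shape_py shapes axis)[n]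
      = shapes.foldl (fun c sh => pvG axis n c (sh.getD n none)) (if n = a then some 0 else none) := by
    rw [← List.getD_eq_getElem (d := none), hAdef]
    rw [pvA_fold_getD axis shapes _ (by simpa using hlens) n (by simpa using hn), hinit]
  -- B value at n
  have hB : (compute_concat_shape_py_alt shapes axis)[n]
      = if (n : Int) = axis then shapes.foldl (pvAxisStep axis) (some 0)
        else (shapes.map (fun r => r.getD n none)).foldl pvColStep none := by
    have hn' : n < (pvZipStar shapes).length := by simp [hcols, hn]
    rw [List.getElem_of_eq hBdef, List.getElem_map, PySem.List.getElem_enumerate]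
    simp only [hcols, List.getElem_map, List.getElem_range, Int.zero_add]
  rw [hA, hB]
  by_cases hcase : n = a
  · rw [if_pos hcase, if_pos (show (n : Int) = axis by omega)]
    apply PySem.List.foldl_congr_mem
    intro acc sh hsh
    have hlsh : sh.length = rank := hlens sh hsh
    have hget : PySem.List.pyGet? sh axis = some (sh.getD n none) := by
      have hax : axis = (n : Int) := by omega
      rw [hax, PySem.List.pyGet?_natCast]
      simp [List.getD_eq_getElem?_getD, List.getElem?_eq_getElem (show n < sh.length by omega)]
    simp [pvAxisStep, hget, pvG, show ((n : Int) = axis) by omega]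
  · rw [if_neg (by omega), if_neg (by omega)]
    rw [List.foldl_map]
    apply PySem.List.foldl_congr_mem
    intro acc sh hsh
    simp [pvG, show ¬ ((n : Int) = axis) by omega]


-- ===== VERDICT (by name: the statement is the Claim_ definition above) =====
theorem compute_concat_shape_py_spec : Claim_equal_compute_concat_shape_py := by
  intro shapes axis _ hpre
  obtain ⟨hne, hax0, haxlt, hlens, _⟩ := hpre
  unfold Spec_compute_concat_shape_py
  exact pvMain shapes axis hne hax0 haxlt hlens
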